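-- pv_equiv track=rewrite | github.com/leandro-mana/data-algorithms-with-pyspark | src/chapter_05/examples/partition_basics.py | partition_sum
-- ===== SOURCE A (Python) =====
-- from collections.abc import Iterable, Iterator
--
-- def partition_sum(iterator: Iterable[int]) -> Iterator[tuple[int, int]]:
--     """Sum elements within a partition, yielding (sum, count).
--
--     This is the mapPartitions pattern — process a batch of elements
--     and emit aggregated results, reducing shuffle data.
--     """
--     total = 0
--     count = 0
--     for num in iterator:
--         total += num
--         count += 1
--     if count > 0:
--         yield (total, count)
-- ===== SOURCE B (Python) =====
-- def partition_sum(iterator):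
--     """Divide-and-conquer aggregation: recursively split the batch in half,
--     aggregate each half to (sum, count), and merge the partial aggregates
--     (the tree-reduce pattern), instead of one left-to-right accumulation."""
--     items = list(iterator)
--     if not items:
--         return
--
--     def agg(lo, hi):
--         if hi - lo == 1:
--             return (items[lo], 1)
--         mid = (lo + hi) // 2
--         s1, c1 = agg(lo, mid)
--         s2, c2 = agg(mid, hi)
--         return (s1 + s2, c1 + c2)
--
--     yield agg(0, len(items))
-- ===== Notes on version B (the rewrite author's own statement) =====
-- stated objective: alternative
-- what changed: B replaces A's single left-to-right accumulation loop with a divide-and-conquer tree reduction: it materializes the batch, recursively splits the index range in half, aggregates each half to (sum, count), and merges the partial aggregates.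
import Mathlib
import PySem

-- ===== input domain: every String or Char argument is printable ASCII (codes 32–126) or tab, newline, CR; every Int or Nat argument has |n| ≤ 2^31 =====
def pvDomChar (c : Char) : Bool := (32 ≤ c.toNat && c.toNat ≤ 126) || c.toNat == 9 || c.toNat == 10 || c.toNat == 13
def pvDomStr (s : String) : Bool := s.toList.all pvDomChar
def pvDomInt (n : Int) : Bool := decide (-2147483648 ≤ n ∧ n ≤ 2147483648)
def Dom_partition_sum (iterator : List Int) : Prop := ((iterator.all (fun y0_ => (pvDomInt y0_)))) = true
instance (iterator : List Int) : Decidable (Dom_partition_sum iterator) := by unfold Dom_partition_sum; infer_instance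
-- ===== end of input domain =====

-- B replaces A's single accumulation loop with a divide-and-conquer tree reduction (alternative decomposition, same cost).


-- ===== PORT A =====
-- loop: total += num; count += 1, then yield (total, count) iff count > 0
def partition_sum (iterator : List Int) : List (Int × Int) :=
  let tc := iterator.foldl (fun (s : Int × Int) num => (s.1 + num, s.2 + 1)) (0, 0)
  if tc.2 > 0 then [(tc.1, tc.2)] else []

-- ===== PORT B =====
-- agg(lo, hi) on the slice items[lo:hi], ported as recursion on the slice itself:
-- a one-element slice is the base case; otherwise split at mid = len // 2 and merge.
-- (the [] case is unreachable from partition_sum_alt, needed only for totality)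
def pvAgg : List Int → Int × Int
  | [] => (0, 0)
  | [x] => (x, 1)
  | x :: y :: zs =>
    let mid := (x :: y :: zs).length / 2
    let s1 := pvAgg ((x :: y :: zs).take mid)
    let s2 := pvAgg ((x :: y :: zs).drop mid)
    (s1.1 + s2.1, s1.2 + s2.2)
termination_by xs => xs.length
decreasing_by
  · simp [List.length_take]; omega
  · simp [List.length_drop]; omega

def partition_sum_alt (iterator : List Int) : List (Int × Int) :=
  if iterator = [] then [] else [pvAgg iterator]

-- ===== PRECONDITION & SPEC =====
def Spec_partition_sum (iterator : List Int) (out : List (Int × Int)) : Prop := out = partition_sum_alt iterator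
instance (iterator : List Int) (out : List (Int × Int)) : Decidable (Spec_partition_sum iterator out) := by unfold Spec_partition_sum; infer_instance

-- ===== CLAIM =====
def Claim_equal_partition_sum : Prop := ∀ (iterator : List Int), Dom_partition_sum iterator → Spec_partition_sum iterator (partition_sum iterator)

-- ===== LEMMAS AND PROOFS =====
-- the tree reduction computes (sum, length)
theorem pvAgg_eq (xs : List Int) : pvAgg xs = (xs.sum, (xs.length : Int)) := by
  induction xs using pvAgg.induct with
  | case1 => simp [pvAgg]
  | case2 x => simp [pvAgg]
  | case3 x y zs mid ih1 ih2 =>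
    simp only [pvAgg]
    rw [ih1, ih2]
    have hs : (((x :: y :: zs).take mid).sum + ((x :: y :: zs).drop mid).sum)
        = (x :: y :: zs).sum := by
      conv_rhs => rw [← List.take_append_drop mid (x :: y :: zs)]
      rw [List.sum_append]
    have hl : ((((x :: y :: zs).take mid).length : Int) + (((x :: y :: zs).drop mid).length : Int))
        = ((x :: y :: zs).length : Int) := by
      push_cast [List.length_take, List.length_drop]
      omega
    have hm : mid = (zs.length + 1 + 1) / 2 := rfl
    simp [hs]
    omega

-- the accumulation loop computes (t + sum, c + length)
theorem foldl_sum_count (xs : List Int) (t c : Int) :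
    xs.foldl (fun (s : Int × Int) num => (s.1 + num, s.2 + 1)) (t, c)
      = (t + xs.sum, c + xs.length) := by
  induction xs generalizing t c with
  | nil => simp
  | cons x xs ih => simp [List.foldl, ih]; constructor <;> ring

-- ===== VERDICT =====
theorem partition_sum_spec : Claim_equal_partition_sum := by
  intro iterator _
  unfold Spec_partition_sum partition_sum partition_sum_alt
  rw [foldl_sum_count]
  cases iterator with
  | nil => simp
  | cons x xs => simp [pvAgg_eq]
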